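-- pv_equiv track=rewrite | github.com/BoocampMonster/Algorithm_Study | Week 2/1195_킥다운/1195_킥다운_유선종.py | kick_down
-- ===== SOURCE A (Python) =====
-- def kick_down(upper:str, below:str):
--     '''upper와 below가 맞물리는 모든 경우의 수 탐색'''
--     length = 200
--     len_u, len_b = len(upper), len(below)
--     board = '0' * len_u + below + '0' * len_u # upper이 들어갈 수 있는 모든 경우의 수
--     for b_i in range(len_b+len_u):
--         is_kick_down = True
--         for u_i, u in enumerate(upper):
--             if board[b_i+u_i] == '2' and u == '2': # 이가 서로 맞물리는 경우
--                 is_kick_down = False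
--                 break
--         if is_kick_down:
--             if b_i <= len_u: # upper가 좌측
--                 sub_below = board[b_i:len_b+len_u]
--             elif len_u < b_i < len_b: # upper가 below안에 포함
--                 sub_below = below
--             else: # upper가 우측
--                 sub_below = board[len_u:b_i+len_u]
--
--             length = min(len(sub_below) ,length)
--
--     return length
-- ===== SOURCE B (Python) =====
-- def kick_down(upper: str, below: str):
--     """Precompute the set of colliding shifts from the '2' positions of the
--     two gears, then scan shifts once with an O(1) membership test."""
--     len_u, len_b = len(upper), len(below)
--     tu = [i for i, c in enumerate(upper) if c == '2']
--     tb = [j for j, c in enumerate(below) if c == '2']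
--     bad = {len_u + j - i for j in tb for i in tu}
--     best = 200
--     for b in range(len_b + len_u):
--         if b in bad:
--             continue
--         if b <= len_u:
--             cand = len_b + len_u - b
--         elif b < len_b:
--             cand = len_b
--         else:
--             cand = b
--         best = min(best, cand)
--     return best
-- ===== Notes on version B (the rewrite author's own statement) =====
-- stated objective: faster
-- what changed: Instead of rescanning upper against the padded board at every shift, B precomputes the '2' positions of both gears once, builds the set of colliding shifts {len_u + j - i}, and scans the shifts with an O(1) set-membership test and a closed-form overlap length instead of a slice.
import Mathlib
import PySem

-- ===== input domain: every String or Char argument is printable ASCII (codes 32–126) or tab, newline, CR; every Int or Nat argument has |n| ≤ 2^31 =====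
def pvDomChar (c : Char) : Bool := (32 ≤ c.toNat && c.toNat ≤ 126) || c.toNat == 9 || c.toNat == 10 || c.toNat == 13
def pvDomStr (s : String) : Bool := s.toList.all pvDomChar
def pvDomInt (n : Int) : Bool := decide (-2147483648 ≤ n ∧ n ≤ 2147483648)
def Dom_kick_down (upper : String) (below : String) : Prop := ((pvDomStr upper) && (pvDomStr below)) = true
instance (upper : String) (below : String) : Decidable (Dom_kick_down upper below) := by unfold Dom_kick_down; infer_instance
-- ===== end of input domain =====

-- B replaces A's per-shift scan of `upper` by a precomputed set of colliding shifts
-- built from the '2' positions of both gears (objective: alternative/faster on sparse teeth).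


-- ===== PORT A =====
-- inner 'for u_i, u in enumerate(upper): … break' loop of A (returns is_kick_down).
-- board[b_i+u_i] is always in range in A, so 'pyGet? … == some '2'' is exact.
def kickInnerA (board : List Char) (b_i : Int) : List (Int × Char) → Bool
  | [] => true
  | (u_i, u) :: rest =>
      if PySem.List.pyGet? board (b_i + u_i) == some '2' && u == '2' then false
      else kickInnerA board b_i rest

def kick_down (upper : String) (below : String) : Int :=
  let u := upper.toList
  let v := below.toList
  let len_u := u.length
  let len_b := v.length
  let board := List.replicate len_u '0' ++ v ++ List.replicate len_u '0'
  (PySem.List.pyRange 0 ((len_b : Int) + (len_u : Int)) 1).foldl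
    (fun length b_i =>
      if kickInnerA board b_i (PySem.List.enumerate u 0) then
        let sub_below : List Char :=
          if b_i ≤ (len_u : Int) then
            PySem.List.slice board (some b_i) (some ((len_b : Int) + (len_u : Int)))
          else if (len_u : Int) < b_i ∧ b_i < (len_b : Int) then v
          else PySem.List.slice board (some (len_u : Int)) (some (b_i + (len_u : Int)))
        min (sub_below.length : Int) length
      else length) 200

-- ===== PORT B =====
def kick_down_alt (upper : String) (below : String) : Int :=
  let u := upper.toList
  let v := below.toList
  let len_u := u.length
  let len_b := v.length
  let tu := (PySem.List.enumerate u 0).filterMap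
    (fun p => if p.2 == '2' then some p.1 else none)
  let tb := (PySem.List.enumerate v 0).filterMap
    (fun p => if p.2 == '2' then some p.1 else none)
  let bad : PySem.Set Int :=
    PySem.Set.ofList (tb.flatMap (fun j => tu.map (fun i => (len_u : Int) + j - i)))
  (PySem.List.pyRange 0 ((len_b : Int) + (len_u : Int)) 1).foldl
    (fun best b =>
      if PySem.Set.contains bad b then best
      else
        let cand : Int :=
          if b ≤ (len_u : Int) then (len_b : Int) + (len_u : Int) - b
          else if b < (len_b : Int) then (len_b : Int)
          else b
        min best cand) 200

-- ===== PRECONDITION & SPEC =====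
def Spec_kick_down (upper : String) (below : String) (out : Int) : Prop := out = kick_down_alt upper below
instance (upper : String) (below : String) (out : Int) : Decidable (Spec_kick_down upper below out) := by unfold Spec_kick_down; infer_instance

-- ===== CLAIM (what is proved, stated in full; the proofs are below) =====
def Claim_equal_kick_down : Prop := ∀ (upper : String) (below : String), Dom_kick_down upper below → Spec_kick_down upper below (kick_down upper below)

-- ===== LEMMAS AND PROOFS =====

-- membership in the enumerate list
lemma mem_enumerate_iff {α : Type} (xs : List α) (s i : Int) (c : α) :
    (i, c) ∈ PySem.List.enumerate xs s ↔
      ∃ k : Nat, k < xs.length ∧ i = s + k ∧ xs[k]? = some c := by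
  induction xs generalizing s with
  | nil => simp [PySem.List.enumerate_nil]
  | cons x xs ih =>
      simp only [PySem.List.enumerate_cons, List.mem_cons, ih, Prod.mk.injEq]
      constructor
      · rintro (⟨h1, h2⟩ | ⟨k, hk, hi, hc⟩)
        · exact ⟨0, by simp, by omega, by simp [h2]⟩
        · exact ⟨k + 1, by simp only [List.length_cons]; omega, by push_cast; omega,
            by simpa using hc⟩
      · rintro ⟨k, hk, hi, hc⟩
        cases k with
        | zero => left; simp at hc; exact ⟨by omega, hc.symm⟩
        | succ k =>
            right
            exact ⟨k, by simp only [List.length_cons] at hk; omega, by push_cast at hi ⊢; omega,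
              by simpa using hc⟩

-- the inner loop of A returns true iff no enumerated tooth collides
lemma kickInnerA_eq_not_any (board : List Char) (b_i : Int) (l : List (Int × Char)) :
    kickInnerA board b_i l =
      ! l.any (fun p => PySem.List.pyGet? board (b_i + p.1) == some '2' && p.2 == '2') := by
  induction l with
  | nil => rfl
  | cons p rest ih =>
      obtain ⟨i, c⟩ := p
      by_cases h : (PySem.List.pyGet? board (b_i + i) == some '2' && c == '2') = true
      · simp [kickInnerA, h]
      · simp only [kickInnerA, List.any_cons]
        rw [if_neg (by simpa using h)]
        simp only [h, ih, Bool.false_or]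

-- reading the padded board at a nonnegative index
lemma board_get_eq (v : List Char) (n : Nat) (p : Int) (hp : 0 ≤ p)
    (_hlt : p < (n : Int) + v.length + n) :
    PySem.List.pyGet? (List.replicate n '0' ++ v ++ List.replicate n '0') p = some '2' ↔
      (n : Int) ≤ p ∧ p < (n : Int) + v.length ∧ v[(p - n).toNat]? = some '2' := by
  rw [PySem.List.pyGet?_of_nonneg _ hp, List.append_assoc]
  by_cases h1 : p.toNat < n
  · rw [List.getElem?_append_left (by simpa using h1)]
    rw [List.getElem?_replicate]
    simp only [h1, if_pos]
    constructor
    · intro h; exact absurd h (by decide)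
    · rintro ⟨h, -⟩; omega
  · rw [List.getElem?_append_right (by simp; omega)]
    simp only [List.length_replicate]
    by_cases h2 : p.toNat - n < v.length
    · rw [List.getElem?_append_left h2]
      have he : (p - n).toNat = p.toNat - n := by omega
      rw [he]
      constructor
      · intro h; exact ⟨by omega, by omega, h⟩
      · rintro ⟨-, -, h⟩; exact h
    · rw [List.getElem?_append_right (by omega)]
      rw [List.getElem?_replicate]
      constructor
      · intro h
        by_cases h3 : p.toNat - n - v.length < n
        · simp only [h3, if_pos] at h
          exact absurd h (by decide)
        · simp [h3] at h
      · rintro ⟨-, h, -⟩; omega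

-- membership in B's '2'-position list
lemma mem_twos_iff (xs : List Char) (i : Int) :
    i ∈ (PySem.List.enumerate xs 0).filterMap
        (fun p => if p.2 == '2' then some p.1 else none) ↔
      ∃ k : Nat, k < xs.length ∧ i = (k : Int) ∧ xs[k]? = some '2' := by
  simp only [List.mem_filterMap]
  constructor
  · rintro ⟨⟨j, c⟩, hmem, hif⟩
    by_cases hc : (c == '2') = true
    · have hc' : c = '2' := by simpa using hc
      simp only [hc, if_pos] at hif
      have hji : j = i := by simpa using hif
      obtain ⟨k, hk, hj, hg⟩ := (mem_enumerate_iff xs 0 j c).mp hmem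
      exact ⟨k, hk, by omega, by rw [hg, hc']⟩
    · simp [hc] at hif
  · rintro ⟨k, hk, hi, hg⟩
    exact ⟨((k : Int), '2'), (mem_enumerate_iff xs 0 (k : Int) '2').mpr ⟨k, hk, by omega, hg⟩,
      by simp [hi]⟩

-- A's collision test agrees with membership in B's bad-shift set
lemma collision_iff (u v : List Char) (b : Int) (hb0 : 0 ≤ b)
    (hb1 : b < (v.length : Int) + u.length) :
    kickInnerA (List.replicate u.length '0' ++ v ++ List.replicate u.length '0') b
        (PySem.List.enumerate u 0) =
      ! PySem.Set.contains
          (PySem.Set.ofList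
            (((PySem.List.enumerate v 0).filterMap
                (fun p => if p.2 == '2' then some p.1 else none)).flatMap
              (fun j => ((PySem.List.enumerate u 0).filterMap
                  (fun p => if p.2 == '2' then some p.1 else none)).map
                (fun i => (u.length : Int) + j - i)))) b := by
  rw [kickInnerA_eq_not_any]
  congr 1
  rw [Bool.eq_iff_iff, List.any_eq_true, PySem.Set.contains_iff, PySem.Set.mem_ofList, List.mem_flatMap]
  constructor
  · rintro ⟨⟨i, c⟩, hmem, hP⟩
    obtain ⟨k, hk, hi, hg⟩ := (mem_enumerate_iff u 0 i c).mp hmem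
    simp only [Bool.and_eq_true, beq_iff_eq] at hP
    obtain ⟨hboard, hc⟩ := hP
    rw [board_get_eq v u.length (b + i) (by omega) (by omega)] at hboard
    obtain ⟨h1, h2, h3⟩ := hboard
    refine ⟨b + i - u.length, ?_, ?_⟩
    · rw [mem_twos_iff]
      exact ⟨(b + i - u.length).toNat, by omega, by omega, by
        have : ((b + i - u.length).toNat : Int) = b + i - u.length := by omega
        rw [← this] at h3 ⊢
        simpa using h3⟩
    · rw [List.mem_map]
      refine ⟨i, ?_, by omega⟩
      rw [mem_twos_iff]
      exact ⟨k, hk, by omega, by rw [hg, hc]⟩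
  · rintro ⟨j, hj, hmem⟩
    rw [List.mem_map] at hmem
    obtain ⟨i, hi, hbij⟩ := hmem
    rw [mem_twos_iff] at hi hj
    obtain ⟨k, hk, hik, hgk⟩ := hi
    obtain ⟨l, hl, hjl, hgl⟩ := hj
    refine ⟨(i, '2'), (mem_enumerate_iff u 0 i '2').mpr ⟨k, hk, by omega, hgk⟩, ?_⟩
    simp only [Bool.and_eq_true, beq_iff_eq, and_true]
    rw [board_get_eq v u.length (b + i) (by omega) (by omega)]
    refine ⟨by omega, by omega, ?_⟩
    have : (b + i - u.length).toNat = l := by omega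
    rw [this, hgl]

-- length of the left-overlap slice (branch b ≤ len_u)
lemma slice_left_len (v : List Char) (n : Nat) (b : Int) (hb0 : 0 ≤ b)
    (hb : b ≤ (n : Int)) :
    (((PySem.List.slice (List.replicate n '0' ++ v ++ List.replicate n '0')
        (some b) (some ((v.length : Int) + (n : Int)))).length : Int)) =
      (v.length : Int) + n - b := by
  rw [PySem.List.slice_toNat _ hb0 (by omega)]
  simp only [List.length_take, List.length_drop, List.length_append, List.length_replicate]
  omega

-- length of the right-overlap slice (branch len_u < b, ¬(len_u < b < len_b))
lemma slice_right_len (v : List Char) (n : Nat) (b : Int) (hb0 : 0 ≤ b)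
    (hb : b < (v.length : Int) + n) :
    (((PySem.List.slice (List.replicate n '0' ++ v ++ List.replicate n '0')
        (some (n : Int)) (some (b + (n : Int)))).length : Int)) = b := by
  rw [PySem.List.slice_toNat _ (by omega) (by omega)]
  simp only [List.length_take, List.length_drop, List.length_append, List.length_replicate]
  omega

-- ===== VERDICT (by name: the statement is the Claim_ definition above) =====
theorem kick_down_spec : Claim_equal_kick_down := by
  intro upper below _
  unfold Spec_kick_down kick_down kick_down_alt
  set u := upper.toList
  set v := below.toList
  apply PySem.List.foldl_congr_mem
  intro length b hmem
  rw [PySem.List.mem_pyRange_one] at hmem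
  obtain ⟨hb0, hb1⟩ := hmem
  rw [collision_iff u v b hb0 hb1]
  by_cases hcoll : PySem.Set.contains
      (PySem.Set.ofList
        (((PySem.List.enumerate v 0).filterMap
            (fun p => if p.2 == '2' then some p.1 else none)).flatMap
          (fun j => ((PySem.List.enumerate u 0).filterMap
              (fun p => if p.2 == '2' then some p.1 else none)).map
            (fun i => (u.length : Int) + j - i)))) b
  · simp only [hcoll]; simp
  · simp only [Bool.not_eq_true] at hcoll
    simp only [hcoll, Bool.not_false, if_true, if_false, Bool.false_eq_true]
    by_cases h1 : b ≤ (u.length : Int)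
    · rw [if_pos h1, if_pos h1, slice_left_len v u.length b hb0 h1]
      exact min_comm _ _
    · rw [if_neg h1, if_neg h1]
      by_cases h2 : (u.length : Int) < b ∧ b < (v.length : Int)
      · rw [if_pos h2, if_pos h2.2]
        exact min_comm _ _
      · rw [if_neg h2, if_neg (by omega), slice_right_len v u.length b hb0 hb1]
        exact min_comm _ _
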